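-- pv_equiv track=rewrite | github.com/magnet5258/Algorithm | 프로그래머스/2/131127. 할인 행사/할인 행사.py | solution
-- ===== SOURCE A (Python) =====
-- def solution(want, number, discount):
--     answer = 0
--     want_lst = []
--     for i in range(len(want)):
--         want_lst += [want[i]] * number[i]
--     want_lst.sort()
--     length = len(want_lst)
--     for i in range(len(discount) - length + 1):
--         if want_lst == sorted(discount[i:i + length]):
--             answer += 1
--     return answer
-- ===== SOURCE B (Python) =====
-- def _shift(cnt, bad, target, x, d):
--     """Update cnt[x] by d; return the new number of items whose count in the
--     current window disagrees with its target count."""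
--     old = cnt.get(x, 0)
--     new = old + d
--     t = target.get(x, 0)
--     if old == t and new != t:
--         bad += 1
--     elif old != t and new == t:
--         bad -= 1
--     cnt[x] = new
--     return bad
--
--
-- def solution(want, number, discount):
--     # desired counts (items requested a non-positive number of times don't
--     # constrain a window) and the window size
--     target = {}
--     length = 0
--     for w, c in zip(want, number):
--         if c > 0:
--             target[w] = target.get(w, 0) + c
--             length += c
--     n = len(discount)
--     if length > n:
--         return 0
--     # counts of the first window, with a running mismatch count
--     cnt = {}
--     bad = len(target)
--     for x in discount[:length]:
--         bad = _shift(cnt, bad, target, x, 1)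
--     answer = 1 if bad == 0 else 0
--     # slide the window over each further end position
--     for i in range(length, n):
--         x = discount[i - length]
--         y = discount[i]
--         if x != y:
--             bad = _shift(cnt, bad, target, x, -1)
--             bad = _shift(cnt, bad, target, y, 1)
--         if bad == 0:
--             answer += 1
--     return answer
-- ===== Notes on version B (the rewrite author's own statement) =====
-- stated objective: faster
-- what changed: Replaces A's per-window slicing and sorting with a single sliding pass that keeps a window frequency dictionary and a running count of mismatched items, updated incrementally as the window moves; Pre_ excludes only the inputs where A raises IndexError (number shorter than want).
import Mathlib
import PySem

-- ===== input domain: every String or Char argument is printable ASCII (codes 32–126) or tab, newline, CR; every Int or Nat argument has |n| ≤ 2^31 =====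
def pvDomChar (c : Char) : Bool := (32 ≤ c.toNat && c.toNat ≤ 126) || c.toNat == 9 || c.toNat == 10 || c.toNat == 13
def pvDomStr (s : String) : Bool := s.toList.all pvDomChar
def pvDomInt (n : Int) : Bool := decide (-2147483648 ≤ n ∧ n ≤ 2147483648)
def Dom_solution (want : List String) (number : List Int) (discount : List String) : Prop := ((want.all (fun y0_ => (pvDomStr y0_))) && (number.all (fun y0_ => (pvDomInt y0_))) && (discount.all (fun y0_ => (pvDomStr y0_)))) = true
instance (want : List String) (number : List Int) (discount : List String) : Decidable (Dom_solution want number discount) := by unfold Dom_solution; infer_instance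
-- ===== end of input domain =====

-- B replaces A's per-window slice-and-sort with one sliding pass keeping a window
-- frequency dictionary and a running mismatch count (objective: faster).

-- ===== PORT A =====
-- want_lst after the building loop (a local of A, kept as a helper)
def pvA_wantLst0 (want : List String) (number : List Int) : List String :=
  (PySem.List.pyRange 0 (want.length : Int) 1).foldl
    (fun acc i => acc ++ PySem.List.pyRepeat [PySem.List.pyGetD want i ""] (PySem.List.pyGetD number i 0)) []

-- want_lst after want_lst.sort()
def pvA_wantLst (want : List String) (number : List Int) : List String :=
  PySem.List.sorted (pvA_wantLst0 want number) (fun x => x) false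

-- length = len(want_lst): the in-place sort does not change the length, so it is read off the
-- pre-sort list (the sorted list itself is only demanded where a window is compared to it)
def solution (want : List String) (number : List Int) (discount : List String) : Int :=
  (PySem.List.pyRange 0 ((discount.length : Int) - ((pvA_wantLst0 want number).length : Int) + 1) 1).foldl
    (fun acc i =>
      if pvA_wantLst want number
         = PySem.List.sorted
             (PySem.List.slice discount (some i) (some (i + ((pvA_wantLst0 want number).length : Int))))
             (fun x => x) false
      then acc + 1 else acc) 0

-- ===== PORT B =====
-- port of Source B's _shift: returns (the updated cnt, the new bad)
def pvShift (cnt : PySem.Dict String Int) (bad : Int) (target : PySem.Dict String Int)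
    (x : String) (d : Int) : PySem.Dict String Int × Int :=
  let old := cnt.getD x 0
  let new := old + d
  let t := target.getD x 0
  let bad' := if old = t ∧ new ≠ t then bad + 1 else if old ≠ t ∧ new = t then bad - 1 else bad
  (cnt.insert x new, bad')

-- B's first loop: builds (target, length)
def pvB_tl (want : List String) (number : List Int) : PySem.Dict String Int × Int :=
  (want.zip number).foldl
    (fun (s : PySem.Dict String Int × Int) p =>
      if p.2 > 0 then (s.1.insert p.1 (s.1.getD p.1 0 + p.2), s.2 + p.2) else s)
    (PySem.Dict.empty, 0)

-- B's second loop: counts of the first window with the running mismatch count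
def pvB_pre (target : PySem.Dict String Int) (length : Int) (discount : List String) :
    PySem.Dict String Int × Int :=
  (PySem.List.slice discount none (some length)).foldl
    (fun (s : PySem.Dict String Int × Int) x => pvShift s.1 s.2 target x 1)
    (PySem.Dict.empty, (target.size : Int))

-- the body of B's sliding loop (a slide by one position; equal in/out items cancel)
def pvStep (target : PySem.Dict String Int) (length : Int) (discount : List String)
    (s : PySem.Dict String Int × Int × Int) (i : Int) : PySem.Dict String Int × Int × Int :=
  let x := PySem.List.pyGetD discount (i - length) ""
  let y := PySem.List.pyGetD discount i ""
  let cb := if x ≠ y then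
      let b1 := pvShift s.1 s.2.1 target x (-1)
      pvShift b1.1 b1.2 target y 1
    else (s.1, s.2.1)
  (cb.1, cb.2, if cb.2 = 0 then s.2.2 + 1 else s.2.2)

-- B's sliding loop, over the remaining window-end positions
def pvB_loop (target : PySem.Dict String Int) (length : Int) (discount : List String)
    (init : PySem.Dict String Int × Int × Int) : PySem.Dict String Int × Int × Int :=
  (PySem.List.pyRange length (discount.length : Int) 1).foldl
    (pvStep target length discount) init

def solution_alt (want : List String) (number : List Int) (discount : List String) : Int :=
  if (pvB_tl want number).2 > (discount.length : Int) then 0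
  else
    (pvB_loop (pvB_tl want number).1 (pvB_tl want number).2 discount
      ((pvB_pre (pvB_tl want number).1 (pvB_tl want number).2 discount).1,
       (pvB_pre (pvB_tl want number).1 (pvB_tl want number).2 discount).2,
       if (pvB_pre (pvB_tl want number).1 (pvB_tl want number).2 discount).2 = 0 then 1 else 0)).2.2

-- ===== PRECONDITION & SPEC =====
-- Pre_ excludes exactly the inputs where A raises IndexError (number shorter than want).
def Pre_solution (want : List String) (number : List Int) (discount : List String) : Prop :=
  want.length ≤ number.length
instance (want : List String) (number : List Int) (discount : List String) : Decidable (Pre_solution want number discount) := by unfold Pre_solution; infer_instance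

def pvWitness_solution : List String × List Int × List String := (["a", "b"], [2, 1], ["a", "b", "a", "a", "b", "a"])

def Spec_solution (want : List String) (number : List Int) (discount : List String) (out : Int) : Prop := out = solution_alt want number discount
instance (want : List String) (number : List Int) (discount : List String) (out : Int) : Decidable (Spec_solution want number discount out) := by unfold Spec_solution; infer_instance

-- ===== CLAIM (what is proved, stated in full; the proofs are below) =====
def Claim_equal_solution : Prop := ∀ (want : List String) (number : List Int) (discount : List String), Dom_solution want number discount → Pre_solution want number discount → Spec_solution want number discount (solution want number discount)


-- ===== LEMMAS AND PROOFS =====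

-- the want/number pairs with positive count, the desired multiset, its size, the target counter
def pvFZ (want : List String) (number : List Int) : List (String × Int) :=
  (want.zip number).filter (fun p => decide (0 < p.2))

def pvRaw (want : List String) (number : List Int) : List String :=
  (want.zip number).flatMap (fun p => List.replicate p.2.toNat p.1)

def pvTarget (want : List String) (number : List Int) : PySem.Dict String Int :=
  (pvFZ want number).foldl (fun d p => d.insert p.1 (d.getD p.1 0 + p.2)) PySem.Dict.empty

def pvLen (want : List String) (number : List Int) : Int :=
  ((pvFZ want number).map (·.2)).sum

-- number of keys whose window count disagrees with the target count
def pvBad (want : List String) (number : List Int) (m : List String) : ℕ :=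
  ((m.toFinset ∪ (pvTarget want number).keys.toFinset).filter
    (fun x => ¬ ((m.count x : Int) = (pvTarget want number).getD x 0))).card

lemma pv_zip_eq_map_range (want : List String) (number : List Int) (h : want.length ≤ number.length) :
    want.zip number = (List.range want.length).map (fun k => (want.getD k "", number.getD k 0)) := by
  apply List.ext_getElem
  · simp; omega
  · intro i h1 h2
    simp at h1
    simp [List.getElem_zip, h1.1, h1.2]

lemma pv_getD_ins_fold (l : List (String × Int)) (d : PySem.Dict String Int) (x : String) :
    (l.foldl (fun d p => d.insert p.1 (d.getD p.1 0 + p.2)) d).getD x 0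
      = d.getD x 0 + ((l.filter (fun p => p.1 == x)).map (·.2)).sum := by
  induction l generalizing d with
  | nil => simp
  | cons p t ih =>
    simp only [List.foldl_cons, ih]
    by_cases hx : p.1 = x
    · simp [hx, PySem.Dict.getD_insert]
      ring
    · simp [hx, PySem.Dict.getD_insert, Ne.symm hx]

lemma pv_target_getD (want : List String) (number : List Int) (x : String) :
    (pvTarget want number).getD x 0 = (((pvFZ want number).filter (fun p => p.1 == x)).map (·.2)).sum := by
  simp [pvTarget, pv_getD_ins_fold]

lemma pv_count_raw (zs : List (String × Int)) (x : String) :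
    (((zs.flatMap (fun p => List.replicate p.2.toNat p.1)).count x : Int))
      = (((zs.filter (fun p => (p.1 == x) && decide (0 < p.2))).map (·.2)).sum) := by
  induction zs with
  | nil => simp
  | cons p t ih =>
    simp only [List.flatMap_cons, List.count_append, List.filter_cons]
    by_cases hp : 0 < p.2
    · by_cases hx : p.1 = x
      · simp [hp, hx, List.count_replicate, ← ih]; omega
      · simp [hp, hx, List.count_replicate, ← ih, Ne.symm hx]
    · have h0 : p.2.toNat = 0 := by omega
      simp [hp, h0, ← ih]

lemma pv_tgt_eq_count (want : List String) (number : List Int) (x : String) :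
    (pvTarget want number).getD x 0 = ((pvRaw want number).count x : Int) := by
  rw [pv_target_getD, pvRaw, pv_count_raw, pvFZ, List.filter_filter]

lemma pv_len_raw (want : List String) (number : List Int) :
    ((pvRaw want number).length : Int) = pvLen want number := by
  unfold pvRaw pvLen pvFZ
  induction (want.zip number) with
  | nil => simp
  | cons p t ih =>
    simp only [List.flatMap_cons, List.length_append, List.filter_cons]
    by_cases hp : 0 < p.2
    · simp [hp, ← ih]; omega
    · have h0 : p.2.toNat = 0 := by omega
      simp [hp, h0, ← ih]

lemma pv_target_keys (want : List String) (number : List Int) :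
    (pvTarget want number).keys = PySem.Set.ofList ((pvFZ want number).map (·.1)) := by
  have h := PySem.Dict.keys_foldl_insert_key (pvFZ want number) (fun p : String × Int => p.1)
    (fun d p => d.getD p.1 0 + p.2) (PySem.Dict.empty (κ := String) (ν := Int))
  rw [pvTarget]
  simpa [PySem.Dict.keys_empty, PySem.Set.ofList_eq_foldl, PySem.Set.update] using h

lemma pv_target_nodup (want : List String) (number : List Int) : (pvTarget want number).keys.Nodup := by
  rw [pvTarget]
  exact PySem.Dict.nodup_keys_foldl_insert_key _ _ _ _ (by simp [PySem.Dict.keys_empty])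

lemma pv_tgt_pos_of_mem (want : List String) (number : List Int) (x : String)
    (hx : x ∈ (pvTarget want number).keys) : 0 < (pvTarget want number).getD x 0 := by
  rw [pv_target_keys] at hx
  rw [PySem.Set.mem_ofList] at hx
  obtain ⟨p, hp, hpx⟩ := List.mem_map.mp hx
  rw [pv_target_getD]
  apply List.sum_pos
  · intro y hy
    obtain ⟨q, hq, hqy⟩ := List.mem_map.mp hy
    have := List.of_mem_filter (List.mem_filter.mp hq).1
    simp at this
    omega
  · have hpmem : p ∈ (pvFZ want number).filter (fun q => q.1 == x) :=
      List.mem_filter.mpr ⟨hp, by simp [hpx]⟩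
    have hmm := List.mem_map_of_mem (f := fun q : String × Int => q.2) hpmem
    exact List.ne_nil_of_mem hmm

lemma pv_tgt_zero_of_not_mem (want : List String) (number : List Int) (x : String)
    (hx : x ∉ (pvTarget want number).keys) : (pvTarget want number).getD x 0 = 0 := by
  apply PySem.Dict.getD_of_not_contains
  rw [← Bool.not_eq_true, PySem.Dict.contains_iff_mem_keys]
  exact hx

lemma pv_bad_superset (want : List String) (number : List Int) (m : List String) (S : Finset String)
    (hS : m.toFinset ∪ (pvTarget want number).keys.toFinset ⊆ S) :
    pvBad want number m
      = (S.filter (fun x => ¬ ((m.count x : Int) = (pvTarget want number).getD x 0))).card := by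
  unfold pvBad
  congr 1
  apply Finset.ext
  intro x
  simp only [Finset.mem_filter]
  constructor
  · rintro ⟨hmem, hne⟩; exact ⟨hS hmem, hne⟩
  · rintro ⟨hmem, hne⟩
    refine ⟨?_, hne⟩
    by_contra hout
    simp only [Finset.mem_union, List.mem_toFinset] at hout
    push_neg at hout
    have h1 : m.count x = 0 := List.count_eq_zero_of_not_mem hout.1
    have h2 := pv_tgt_zero_of_not_mem want number x hout.2
    rw [h1, h2] at hne
    simp at hne

lemma pv_bad_nil (want : List String) (number : List Int) :
    pvBad want number [] = (pvTarget want number).size := by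
  unfold pvBad
  have h1 : ((pvTarget want number).keys.toFinset.filter
      (fun x => ¬ ((0 : Int) = (pvTarget want number).getD x 0))) = (pvTarget want number).keys.toFinset := by
    apply Finset.filter_true_of_mem
    intro x hx
    have := pv_tgt_pos_of_mem want number x (List.mem_toFinset.mp hx)
    omega
  simp only [List.toFinset_nil, Finset.empty_union, List.count_nil, Nat.cast_zero, h1]
  rw [List.toFinset_card_of_nodup (pv_target_nodup want number)]
  simp [PySem.Dict.size, PySem.Dict.keys]

lemma pv_bad_update (want : List String) (number : List Int) (m m' : List String) (x : String)
    (hc : ∀ y, y ≠ x → m'.count y = m.count y) :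
    (pvBad want number m' : Int)
      = pvBad want number m
        + (if ¬ ((m'.count x : Int) = (pvTarget want number).getD x 0) then 1 else 0)
        - (if ¬ ((m.count x : Int) = (pvTarget want number).getD x 0) then 1 else 0) := by
  set K := (pvTarget want number).keys.toFinset with hK
  set S := insert x (m.toFinset ∪ m'.toFinset ∪ K) with hSdef
  have hS1 : m.toFinset ∪ K ⊆ S := by
    intro y hy; simp only [hSdef, Finset.mem_insert, Finset.mem_union]
    simp only [Finset.mem_union] at hy
    tauto
  have hS2 : m'.toFinset ∪ K ⊆ S := by
    intro y hy; simp only [hSdef, Finset.mem_insert, Finset.mem_union]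
    simp only [Finset.mem_union] at hy
    tauto
  have hxS : x ∈ S := by simp [hSdef]
  rw [pv_bad_superset want number m S hS1, pv_bad_superset want number m' S hS2]
  have key : ∀ (mm : List String),
      (S.filter (fun y => ¬ ((mm.count y : Int) = (pvTarget want number).getD y 0))).card
      = ((S.erase x).filter (fun y => ¬ ((mm.count y : Int) = (pvTarget want number).getD y 0))).card
        + (if ¬ ((mm.count x : Int) = (pvTarget want number).getD x 0) then 1 else 0) := by
    intro mm
    conv_lhs => rw [← Finset.insert_erase hxS]
    rw [Finset.filter_insert]
    split_ifs with h <;>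
      first
        | (rw [Finset.card_insert_of_notMem (by simp)])
        | simp
  rw [key m, key m']
  have heq : ((S.erase x).filter (fun y => ¬ ((m'.count y : Int) = (pvTarget want number).getD y 0)))
      = ((S.erase x).filter (fun y => ¬ ((m.count y : Int) = (pvTarget want number).getD y 0))) := by
    apply Finset.filter_congr
    intro y hy
    have : y ≠ x := Finset.ne_of_mem_erase hy
    rw [hc y this]
  rw [heq]
  push_cast
  ring

lemma pv_bad_eq_zero_iff (want : List String) (number : List Int) (m : List String) :
    pvBad want number m = 0 ↔ m.Perm (pvRaw want number) := by
  unfold pvBad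
  rw [Finset.card_eq_zero, Finset.filter_eq_empty_iff]
  constructor
  · intro h
    rw [List.perm_iff_count]
    intro a
    by_cases ha : a ∈ m.toFinset ∪ (pvTarget want number).keys.toFinset
    · have := h ha
      simp only [not_not] at this
      have h2 := pv_tgt_eq_count want number a
      omega
    · simp only [Finset.mem_union, List.mem_toFinset] at ha
      push_neg at ha
      have h1 : m.count a = 0 := List.count_eq_zero_of_not_mem ha.1
      have h2 := pv_tgt_zero_of_not_mem want number a ha.2
      have h3 := pv_tgt_eq_count want number a
      omega
  · intro h y hy
    rw [List.perm_iff_count] at h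
    have h2 := pv_tgt_eq_count want number y
    have := h y
    omega

lemma pv_bad_perm (want : List String) (number : List Int) (m m' : List String)
    (h : m.Perm m') : pvBad want number m = pvBad want number m' := by
  unfold pvBad
  have hf : m.toFinset = m'.toFinset := by
    apply Finset.ext
    intro x
    simp [h.mem_iff]
  rw [hf]
  congr 1
  apply Finset.filter_congr
  intro x _
  rw [h.count_eq]

lemma pv_shift_spec (want : List String) (number : List Int) (cnt : PySem.Dict String Int) (bad : Int)
    (x : String) (d : Int) (m m' : List String)
    (hi : ∀ y, cnt.getD y 0 = (m.count y : Int))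
    (hb : bad = (pvBad want number m : Int))
    (hc : ∀ y, y ≠ x → m'.count y = m.count y)
    (hx : (m'.count x : Int) = (m.count x : Int) + d) :
    (∀ y, (pvShift cnt bad (pvTarget want number) x d).1.getD y 0 = (m'.count y : Int))
      ∧ (pvShift cnt bad (pvTarget want number) x d).2 = (pvBad want number m' : Int) := by
  unfold pvShift
  simp only []
  constructor
  · intro y
    rw [PySem.Dict.getD_insert]
    by_cases hyx : y = x
    · subst hyx; rw [if_pos rfl, hi y]; omega
    · simp [hyx, hi y, hc y hyx]
  · have hupd := pv_bad_update want number m m' x hc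
    rw [hi x, hb]
    set t := (pvTarget want number).getD x 0 with ht
    by_cases h1 : (m.count x : Int) = t <;> by_cases h2 : ((m.count x : Int) + d) = t <;>
      simp [h1, h2, ← hx] at hupd ⊢ <;> omega

-- want_lst (before sorting) is the desired multiset
lemma pv_wantLst0_eq (want : List String) (number : List Int) (h : want.length ≤ number.length) :
    pvA_wantLst0 want number = pvRaw want number := by
  rw [pvA_wantLst0, PySem.List.pyRange_zero_natCast, List.foldl_map]
  refine (PySem.List.foldl_congr_mem _ _
    (fun (acc : List String) (k : ℕ) =>
      acc ++ List.replicate (number.getD k 0).toNat (want.getD k "")) _ ?_).trans ?_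
  · intro acc k hk
    simp only [List.mem_range] at hk
    show acc ++ PySem.List.pyRepeat [PySem.List.pyGetD want (Int.ofNat k) ""]
        (PySem.List.pyGetD number (Int.ofNat k) 0) = _
    have h1 : PySem.List.pyGetD want (Int.ofNat k) "" = want.getD k "" := by
      exact_mod_cast PySem.List.pyGetD_natCast want k ""
    have h2 : PySem.List.pyGetD number (Int.ofNat k) 0 = number.getD k 0 := by
      exact_mod_cast PySem.List.pyGetD_natCast number k 0
    rw [h1, h2, PySem.List.pyRepeat_singleton]
  · rw [PySem.List.foldl_append_eq_flatMap]
    rw [pvRaw, pv_zip_eq_map_range want number h, List.flatMap_map]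
    rfl

-- A counts the windows that are permutations of the desired multiset
lemma pv_solution_char (want : List String) (number : List Int) (discount : List String)
    (h : want.length ≤ number.length) :
    solution want number discount
      = (((List.range (discount.length + 1 - (pvRaw want number).length)).countP
            (fun k => decide (((discount.drop k).take (pvRaw want number).length).Perm
              (pvRaw want number)))) : Int) := by
  have hw : pvA_wantLst want number = PySem.List.sorted (pvRaw want number) (fun x => x) false := by
    rw [pvA_wantLst, pv_wantLst0_eq want number h]
  set L := (pvRaw want number).length with hL
  set n := discount.length with hn
  have hlen : (pvA_wantLst0 want number).length = L := by
    rw [pv_wantLst0_eq want number h]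
  rw [solution, hlen]
  by_cases hLn : L ≤ n
  · have hM : ((n : Int) - (L : Int) + 1) = ((n + 1 - L : ℕ) : Int) := by omega
    rw [hM, PySem.List.pyRange_zero_natCast, List.foldl_map]
    have hcong : ∀ (acc : Int), ∀ k ∈ List.range (n + 1 - L),
        (if pvA_wantLst want number
           = PySem.List.sorted
               (PySem.List.slice discount (some ((k : ℕ) : Int)) (some (((k : ℕ) : Int) + (L : Int))))
               (fun x => x) false
         then acc + 1 else acc)
        = (if ((discount.drop k).take L).Perm (pvRaw want number) then acc + 1 else acc) := by
      intro acc k hk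
      have hsl : PySem.List.slice discount (some ((k : ℕ) : Int)) (some (((k : ℕ) : Int) + (L : Int)))
          = (discount.drop k).take L := by
        have : (((k : ℕ) : Int) + (L : Int)) = ((k + L : ℕ) : Int) := by omega
        rw [this]
        have := PySem.List.slice_natCast discount k (k + L)
        simpa using this
      rw [hsl, hw]
      by_cases hp : ((discount.drop k).take L).Perm (pvRaw want number)
      · rw [if_pos ((PySem.List.sorted_id_eq_sorted_id_iff_perm _ _).mpr hp.symm), if_pos hp]
      · rw [if_neg (fun hq => hp (((PySem.List.sorted_id_eq_sorted_id_iff_perm _ _).mp hq).symm)), if_neg hp]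
    rw [PySem.List.foldl_congr_mem' _ _ _ _ (by intro k hk acc; exact hcong acc k hk)]
    rw [PySem.List.foldl_ite_add_one]
    simp
  · have hM : ((n : Int) - (L : Int) + 1) ≤ 0 := by omega
    have hnil : PySem.List.pyRange 0 ((n : Int) - (L : Int) + 1) 1 = [] := by
      rw [List.eq_nil_iff_forall_not_mem]
      intro i hi
      rw [PySem.List.mem_pyRange_one] at hi
      omega
    have hz : n + 1 - L = 0 := by omega
    rw [hnil, hz]
    simp

-- B's first loop builds the target counter and the window size
lemma pv_B_tl_eq (want : List String) (number : List Int) :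
    pvB_tl want number = (pvTarget want number, pvLen want number) := by
  rw [pvB_tl]
  have hsplit : (fun (s : PySem.Dict String Int × Int) (p : String × Int) =>
      if p.2 > 0 then (s.1.insert p.1 (s.1.getD p.1 0 + p.2), s.2 + p.2) else s)
      = (fun (s : PySem.Dict String Int × Int) (p : String × Int) =>
          (if 0 < p.2 then s.1.insert p.1 (s.1.getD p.1 0 + p.2) else s.1,
           if 0 < p.2 then s.2 + p.2 else s.2)) := by
    funext s p
    split_ifs <;> rfl
  rw [hsplit]
  rw [PySem.List.foldl_prod_mk
    (f := fun (d : PySem.Dict String Int) (p : String × Int) =>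
      if 0 < p.2 then d.insert p.1 (d.getD p.1 0 + p.2) else d)
    (g := fun (a : Int) (p : String × Int) => if 0 < p.2 then a + p.2 else a)]
  rw [Prod.mk.injEq]
  constructor
  · rw [PySem.List.foldl_ite_eq_foldl_filter]
    rfl
  · rw [PySem.List.foldl_ite_eq_foldl_filter]
    rw [PySem.List.foldl_add (g := fun p : String × Int => p.2)]
    simp [pvLen, pvFZ]

-- the prefill loop: counts of the processed elements and their mismatch count
lemma pv_prefill (want : List String) (number : List Int) (l : List String) :
    ∀ (m : List String) (cnt : PySem.Dict String Int) (bad : Int),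
    (∀ y, cnt.getD y 0 = (m.count y : Int)) → bad = (pvBad want number m : Int) →
    (∀ y, (l.foldl (fun (s : PySem.Dict String Int × Int) x => pvShift s.1 s.2 (pvTarget want number) x 1) (cnt, bad)).1.getD y 0 = ((m ++ l).count y : Int))
    ∧ (l.foldl (fun (s : PySem.Dict String Int × Int) x => pvShift s.1 s.2 (pvTarget want number) x 1) (cnt, bad)).2 = (pvBad want number (m ++ l) : Int) := by
  induction l with
  | nil =>
    intro m cnt bad hi hb
    simpa using ⟨hi, hb⟩
  | cons x t ih =>
    intro m cnt bad hi hb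
    have hs := pv_shift_spec want number cnt bad x 1 m (m ++ [x]) hi hb
      (by intro y hy; simp [List.count_append, Ne.symm hy])
      (by simp [List.count_append])
    have := ih (m ++ [x]) (pvShift cnt bad (pvTarget want number) x 1).1
      (pvShift cnt bad (pvTarget want number) x 1).2 hs.1 hs.2
    have he : (m ++ [x]) ++ t = m ++ x :: t := by rw [List.append_assoc]; rfl
    rw [he] at this
    rw [List.foldl_cons]
    exact this

-- window decompositions
lemma pv_win2_cons (discount : List String) (L k : ℕ) (hL : 1 ≤ L) (hk : k < discount.length) :
    (discount.drop k).take L = discount.getD k "" :: (discount.drop (k+1)).take (L-1) := by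
  obtain ⟨L', rfl⟩ : ∃ L', L = L' + 1 := ⟨L - 1, by omega⟩
  rw [List.drop_eq_getElem_cons hk, List.take_succ_cons]
  rw [List.getD_eq_getElem _ _ hk]
  simp

lemma pv_win2_snoc (discount : List String) (L k : ℕ) (hL : 1 ≤ L) (h : k + 1 + L ≤ discount.length) :
    (discount.drop (k+1)).take L = (discount.drop (k+1)).take (L-1) ++ [discount.getD (k+L) ""] := by
  obtain ⟨L', rfl⟩ : ∃ L', L = L' + 1 := ⟨L - 1, by omega⟩
  have hlen : L' < (discount.drop (k+1)).length := by simp; omega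
  rw [List.take_succ, List.getElem?_eq_getElem hlen]
  have hgd : (discount.drop (k+1))[L'] = discount.getD (k + (L'+1)) "" := by
    rw [List.getElem_drop, List.getD_eq_getElem _ _ (by omega : k + (L'+1) < discount.length)]
    congr 1
    omega
  simp [hgd]

-- the sliding loop invariant, for a non-empty desired multiset that fits in discount
lemma pv_loop_inv (want : List String) (number : List Int) (discount : List String)
    (L : ℕ) (hLraw : L = (pvRaw want number).length) (hL1 : 1 ≤ L) (hLn : L ≤ discount.length)
    (cnt0 : PySem.Dict String Int) (bad0 ans0 : Int)
    (hi0 : ∀ y, cnt0.getD y 0 = ((discount.take L).count y : Int))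
    (hb0 : bad0 = (pvBad want number (discount.take L) : Int))
    (ha0 : ans0 = ((List.range 1).countP
        (fun i => decide (((discount.drop i).take L).Perm (pvRaw want number))) : Int)) :
    ∀ (k : ℕ), k ≤ discount.length - L →
    (∀ y, (((List.range k).map (fun j : ℕ => ((L : ℕ) : Int) + (j : Int))).foldl
        (pvStep (pvTarget want number) ((L : ℕ) : Int) discount) (cnt0, bad0, ans0)).1.getD y 0
        = (((discount.drop k).take L).count y : Int))
    ∧ (((List.range k).map (fun j : ℕ => ((L : ℕ) : Int) + (j : Int))).foldl
        (pvStep (pvTarget want number) ((L : ℕ) : Int) discount) (cnt0, bad0, ans0)).2.1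
        = (pvBad want number ((discount.drop k).take L) : Int)
    ∧ (((List.range k).map (fun j : ℕ => ((L : ℕ) : Int) + (j : Int))).foldl
        (pvStep (pvTarget want number) ((L : ℕ) : Int) discount) (cnt0, bad0, ans0)).2.2
        = ((List.range (k+1)).countP
            (fun i => decide (((discount.drop i).take L).Perm (pvRaw want number))) : Int) := by
  intro k
  induction k with
  | zero =>
    intro _
    refine ⟨?_, ?_, ?_⟩
    · intro y
      simpa using hi0 y
    · simpa using hb0
    · exact ha0
  | succ k ih =>
    intro hk1
    have hk' : k ≤ discount.length - L := by omega
    obtain ⟨ih1, ih2, ih3⟩ := ih hk'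
    have hkn : k < discount.length := by omega
    have hkL : k + 1 + L ≤ discount.length := by omega
    rw [List.range_succ, List.map_append, List.foldl_append]
    simp only [List.map_cons, List.map_nil, List.foldl_cons, List.foldl_nil]
    set st := (((List.range k).map (fun j : ℕ => ((L : ℕ) : Int) + (j : Int))).foldl
        (pvStep (pvTarget want number) ((L : ℕ) : Int) discount) (cnt0, bad0, ans0)) with hst
    have hidx1 : ((L : ℕ) : Int) + (k : Int) - ((L : ℕ) : Int) = ((k : ℕ) : Int) := by
      push_cast; ring
    have hidx2 : ((L : ℕ) : Int) + (k : Int) = ((k + L : ℕ) : Int) := by push_cast; ring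
    have hwc := pv_win2_cons discount L k hL1 hkn
    have hws := pv_win2_snoc discount L k hL1 hkL
    set x1 := discount.getD k "" with hx1
    set x2 := discount.getD (k + L) "" with hx2
    set mid := (discount.drop (k+1)).take (L-1) with hmid2
    -- the countP step, shared by both cases
    have hcount : ∀ b : Int, b = (pvBad want number ((discount.drop (k+1)).take L) : Int) →
        (if b = 0 then st.2.2 + 1 else st.2.2)
        = ((List.range (k+1+1)).countP
            (fun i => decide (((discount.drop i).take L).Perm (pvRaw want number))) : Int) := by
      intro b hb
      rw [hb, ih3, List.range_succ (n := k + 1), List.countP_append, List.countP_cons,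
        List.countP_nil]
      by_cases hp : ((discount.drop (k+1)).take L).Perm (pvRaw want number)
      · rw [if_pos (by exact_mod_cast (pv_bad_eq_zero_iff want number _).mpr hp)]
        simp [hp]
      · rw [if_neg (fun hz => hp ((pv_bad_eq_zero_iff want number _).mp (by exact_mod_cast hz)))]
        simp [hp]
    by_cases hxy : x1 = x2
    · -- the leaving and the entering item coincide: the window multiset is unchanged
      have hmid : pvStep (pvTarget want number) ((L : ℕ) : Int) discount st (((L : ℕ) : Int) + (k : Int))
          = (st.1, st.2.1, if st.2.1 = 0 then st.2.2 + 1 else st.2.2) := by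
        rw [pvStep, hidx1, hidx2]
        simp only [PySem.List.pyGetD_natCast, ← hx1, ← hx2, hxy, ne_eq, not_true_eq_false,
          if_false]
      rw [hmid]
      have hperm : ((discount.drop k).take L).Perm ((discount.drop (k+1)).take L) := by
        rw [hwc, hws, ← hxy]
        exact (List.perm_append_singleton _ _).symm
      refine ⟨?_, ?_, ?_⟩
      · intro y
        rw [ih1 y]
        exact_mod_cast hperm.count_eq y
      · rw [ih2]
        exact_mod_cast congrArg Nat.cast (pv_bad_perm want number _ _ hperm)
      · exact hcount st.2.1 (by rw [ih2]; exact_mod_cast congrArg Nat.cast (pv_bad_perm want number _ _ hperm))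
    · -- a real slide: remove the leaving item, add the entering one
      have hmid : pvStep (pvTarget want number) ((L : ℕ) : Int) discount st (((L : ℕ) : Int) + (k : Int))
          = ((pvShift (pvShift st.1 st.2.1 (pvTarget want number) x1 (-1)).1
                (pvShift st.1 st.2.1 (pvTarget want number) x1 (-1)).2 (pvTarget want number) x2 1).1,
             (pvShift (pvShift st.1 st.2.1 (pvTarget want number) x1 (-1)).1
                (pvShift st.1 st.2.1 (pvTarget want number) x1 (-1)).2 (pvTarget want number) x2 1).2,
             if (pvShift (pvShift st.1 st.2.1 (pvTarget want number) x1 (-1)).1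
                (pvShift st.1 st.2.1 (pvTarget want number) x1 (-1)).2 (pvTarget want number) x2 1).2 = 0
             then st.2.2 + 1 else st.2.2) := by
        rw [pvStep, hidx1, hidx2]
        simp only [PySem.List.pyGetD_natCast, ← hx1, ← hx2, ne_eq, hxy, not_false_eq_true,
          if_true]
      rw [hmid]
      have hs1 := pv_shift_spec want number st.1 st.2.1 x1 (-1) ((discount.drop k).take L) mid ih1 ih2
        (by intro y hy; rw [hwc]; simp [List.count_cons, Ne.symm hy])
        (by rw [hwc]; simp [List.count_cons])
      have hs2 := pv_shift_spec want number
        (pvShift st.1 st.2.1 (pvTarget want number) x1 (-1)).1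
        (pvShift st.1 st.2.1 (pvTarget want number) x1 (-1)).2 x2 1 mid (mid ++ [x2]) hs1.1 hs1.2
        (by intro y hy; simp [List.count_append, Ne.symm hy])
        (by simp [List.count_append])
      refine ⟨?_, ?_, ?_⟩
      · intro y
        rw [hws]
        exact hs2.1 y
      · rw [hws]
        exact hs2.2
      · exact hcount _ (by rw [hws]; exact hs2.2)

-- an empty desired multiset: every key check vanishes and each slide cancels itself
lemma pv_fz_nil (want : List String) (number : List Int) (h : pvLen want number = 0) :
    pvFZ want number = [] := by
  by_contra hne
  have hpos : ∀ y ∈ (pvFZ want number).map (·.2), 0 < y := by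
    intro y hy
    obtain ⟨q, hq, rfl⟩ := List.mem_map.mp hy
    have := List.of_mem_filter hq
    simpa using this
  have hsum := List.sum_pos _ hpos (by simpa using hne)
  rw [pvLen] at h
  omega

lemma pv_loop_zero (target : PySem.Dict String Int) (discount : List String)
    (c0 : PySem.Dict String Int) :
    ∀ (k : ℕ), (((List.range k).map (fun j : ℕ => (j : Int))).foldl
        (pvStep target 0 discount) (c0, 0, 1)) = (c0, 0, (k : Int) + 1) := by
  intro k
  induction k with
  | zero => simp
  | succ k ih =>
    rw [List.range_succ, List.map_append, List.foldl_append, ih]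
    simp only [List.map_cons, List.map_nil, List.foldl_cons, List.foldl_nil]
    rw [pvStep]
    have hi : (k : Int) - 0 = (k : Int) := by ring
    rw [hi]
    simp only [ne_eq, not_true_eq_false, if_false]
    push_cast
    norm_num

-- ===== VERDICT (by name: the statement is the Claim_ definition above) =====
theorem solution_spec : Claim_equal_solution := by
  intro want number discount _ hpre
  unfold Spec_solution
  have hpre' : want.length ≤ number.length := hpre
  set L := (pvRaw want number).length with hLdef
  have hLen : pvLen want number = ((L : ℕ) : Int) := (pv_len_raw want number).symm
  rw [pv_solution_char want number discount hpre']
  rw [solution_alt, pv_B_tl_eq]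
  simp only [hLen]
  by_cases hgt : discount.length < L
  · -- the desired multiset does not fit: no window, answer 0
    rw [if_pos (by exact_mod_cast hgt)]
    have hz : discount.length + 1 - L = 0 := by omega
    rw [hz]
    simp
  · rw [if_neg (by push_cast; omega)]
    -- the prefill result
    have hpref := pv_prefill want number (discount.take L) [] PySem.Dict.empty
        ((pvTarget want number).size : Int)
        (by intro y; simp [PySem.Dict.getD_empty])
        (by rw [pv_bad_nil want number])
    have hpre1 : ∀ y, (pvB_pre (pvTarget want number) ((L : ℕ) : Int) discount).1.getD y 0
        = ((discount.take L).count y : Int) := by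
      intro y
      rw [pvB_pre, PySem.List.slice_to_natCast]
      have h1 := (hpref.1) y
      simpa using h1
    have hpre2 : (pvB_pre (pvTarget want number) ((L : ℕ) : Int) discount).2
        = (pvBad want number (discount.take L) : Int) := by
      rw [pvB_pre, PySem.List.slice_to_natCast]
      have h2 := (hpref.2)
      simpa using h2
    by_cases hL0 : L = 0
    · -- empty desired multiset: every window-end position counts
      have hraw : pvRaw want number = [] := List.length_eq_zero_iff.mp (by omega)
      have hT : pvTarget want number = PySem.Dict.empty := by
        rw [pvTarget, pv_fz_nil want number (by rw [hLen, hL0]; simp)]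
        rfl
      have hbad0 : (pvBad want number (discount.take L) : Int) = 0 := by
        rw [hL0, List.take_zero, pv_bad_nil, hT]
        simp
      have hcast : ((L : ℕ) : Int) = 0 := by rw [hL0]; rfl
      rw [pvB_loop, hpre2, hbad0, if_pos rfl, hcast]
      have hrange : PySem.List.pyRange 0 (discount.length : Int) 1
          = (List.range discount.length).map (fun j : ℕ => (j : Int)) := by
        rw [PySem.List.pyRange_one]
        have hc : ((discount.length : Int) - 0).toNat = discount.length := by omega
        rw [hc]
        simp
      rw [hrange, pv_loop_zero]
      rw [hraw]
      simp
    · -- the generic sliding case: 1 ≤ L ≤ n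
      have hLn : L ≤ discount.length := by omega
      have hz := pv_loop_inv want number discount L hLdef (by omega) hLn
        (pvB_pre (pvTarget want number) ((L : ℕ) : Int) discount).1
        (pvB_pre (pvTarget want number) ((L : ℕ) : Int) discount).2
        (if (pvB_pre (pvTarget want number) ((L : ℕ) : Int) discount).2 = 0 then 1 else 0)
        hpre1 hpre2
        (by
          rw [hpre2]
          simp only [List.range_one, List.countP_cons, List.countP_nil, List.drop_zero]
          by_cases hp : ((discount.take L).Perm (pvRaw want number))
          · rw [if_pos (by exact_mod_cast (pv_bad_eq_zero_iff want number _).mpr hp)]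
            simp [hp]
          · rw [if_neg (fun hzz => hp ((pv_bad_eq_zero_iff want number _).mp (by exact_mod_cast hzz)))]
            simp [hp])
        (discount.length - L) (le_refl _)
      rw [pvB_loop]
      have hrange : PySem.List.pyRange ((L : ℕ) : Int) (discount.length : Int) 1
          = (List.range (discount.length - L)).map (fun j : ℕ => ((L : ℕ) : Int) + (j : Int)) := by
        rw [PySem.List.pyRange_one]
        have hc : ((discount.length : Int) - ((L : ℕ) : Int)).toNat = discount.length - L := by
          omega
        rw [hc]
      rw [hrange, hz.2.2]
      have hidx : discount.length + 1 - L = discount.length - L + 1 := by omega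
      rw [hidx]
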